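-- pv_equiv track=rewrite | github.com/lzx0118/drag | scripts/stage3_prompt/drag_build_prompts_normA_fullkb.py | looks_noisy_value
-- ===== SOURCE A (Python) =====
-- def looks_noisy_value(v: str) -> bool:
--     if not v:
--         return True
--     if len(v) > 80:
--         return True
--     if sum(v.count(p) for p in [",", ";", ":", "|", "/", "\\", "=", "(", ")", "[", "]", "{", "}"]) >= 10:
--         return True
--     return False
-- ===== SOURCE B (Python) =====
-- PUNCT = frozenset(",;:|/\\=()[]{}")
--
-- def looks_noisy_value(v: str) -> bool:
--     if not v:
--         return True
--     if len(v) > 80: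
--         return True
--     n = 0
--     for c in v:
--         if c in PUNCT:
--             n += 1
--     return n >= 10
-- ===== Notes on version B (the rewrite author's own statement) =====
-- stated objective: idiomatic
-- what changed: Replaces thirteen repeated v.count(p) scans (one full traversal of v per punctuation character) with a single pass over v that counts characters that are members of a prebuilt punctuation set.
import Mathlib
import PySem

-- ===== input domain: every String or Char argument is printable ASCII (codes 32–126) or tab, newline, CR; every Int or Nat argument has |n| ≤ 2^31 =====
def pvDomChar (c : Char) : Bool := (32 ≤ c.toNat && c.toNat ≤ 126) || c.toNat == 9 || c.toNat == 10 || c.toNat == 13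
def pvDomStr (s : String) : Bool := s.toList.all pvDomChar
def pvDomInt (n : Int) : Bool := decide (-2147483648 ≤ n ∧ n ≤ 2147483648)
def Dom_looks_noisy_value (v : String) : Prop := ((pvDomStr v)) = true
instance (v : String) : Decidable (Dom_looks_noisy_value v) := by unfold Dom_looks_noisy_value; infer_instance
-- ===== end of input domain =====

-- B replaces thirteen repeated .count scans with one membership-counting pass over the string (idiomatic single traversal).


-- ===== PORT A =====
-- the punctuation list A sums .count over, as string literals (as in the Python)
def punctStrs : List String := [",", ";", ":", "|", "/", "\\", "=", "(", ")", "[", "]", "{", "}"]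

def looks_noisy_value (v : String) : Bool :=
  if v.toList.isEmpty then true
  else if PySem.Str.len v > 80 then true
  else if 10 ≤ (punctStrs.map (fun p => PySem.Str.count v p)).sum then true
  else false

-- ===== PORT B =====
-- B's frozenset of punctuation characters
def punctSet : PySem.Set Char := PySem.Set.ofList [',', ';', ':', '|', '/', '\\', '=', '(', ')', '[', ']', '{', '}']

def looks_noisy_value_alt (v : String) : Bool :=
  if v.toList.isEmpty then true
  else if PySem.Str.len v > 80 then true
  else
    let n : Int := v.toList.foldl (fun n c => if punctSet.contains c then n + 1 else n) 0
    decide (10 ≤ n)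

-- ===== PRECONDITION & SPEC =====
def Spec_looks_noisy_value (v : String) (out : Bool) : Prop := out = looks_noisy_value_alt v
instance (v : String) (out : Bool) : Decidable (Spec_looks_noisy_value v out) := by unfold Spec_looks_noisy_value; infer_instance

-- ===== CLAIM (what is proved, stated in full; the proofs are below) =====
def Claim_equal_looks_noisy_value : Prop := ∀ (v : String), Dom_looks_noisy_value v → Spec_looks_noisy_value v (looks_noisy_value v)

-- ===== LEMMAS AND PROOFS =====

def punctChars : List Char := [',', ';', ':', '|', '/', '\\', '=', '(', ')', '[', ']', '{', '}']

-- Chars.count with a single-character needle counts occurrences of that character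
theorem count_go_single (c : Char) (s : List Char) : ∀ (fuel acc : Nat), s.length ≤ fuel →
    PySem.Chars.count.go [c] fuel s acc = acc + s.count c := by
  induction s with
  | nil =>
    intro fuel acc _
    rw [PySem.Chars.count.go.eq_def]
    cases fuel <;> simp
  | cons h t ih =>
    intro fuel acc hf
    cases fuel with
    | zero => simp at hf
    | succ f =>
      rw [PySem.Chars.count.go.eq_def]
      simp only [List.isPrefixOf, List.length_cons] at *
      by_cases hc : c == h
      · simp [hc, ih f (acc + 1) (by omega), List.count_cons]
        have : c = h := by simpa using hc
        subst this
        simp [Nat.add_comm, Nat.add_left_comm]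
      · simp [hc, ih f acc (by omega), List.count_cons]
        have : ¬ h = c := fun e => hc (by simp [e])
        simp [this]

theorem count_single (c : Char) (s : List Char) :
    PySem.Chars.count s [c] = s.count c := by
  unfold PySem.Chars.count
  simpa using count_go_single c s s.length 0 le_rfl

-- countP of a disjunction with a fresh character splits off a count
theorem countP_or_split (p : Char) (q : Char → Bool) (s : List Char) (hq : q p = false) :
    s.countP (fun c => c == p || q c) = s.count p + s.countP q := by
  induction s with
  | nil => simp
  | cons h t ih =>
    simp only [List.countP_cons, List.count_cons, ih]
    by_cases hp : h == p
    · have : h = p := by simpa using hp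
      subst this
      simp [hq]
      omega
    · have h1 : ¬ p = h := fun e => hp (by simp [e])
      by_cases h2 : q h = true <;> simp [hp, h1, h2] <;> omega

-- the sum of per-character counts over a duplicate-free list equals one membership-counting pass
theorem sum_counts_eq_countP (P : List Char) (hP : P.Nodup) (s : List Char) :
    (P.map (fun p => s.count p)).sum = s.countP (fun c => P.contains c) := by
  induction P with
  | nil => simp
  | cons p P ih =>
    rcases List.nodup_cons.mp hP with ⟨hnm, hnd⟩
    have hq : P.contains p = false := by simpa using hnm
    have hsplit : s.countP (fun c => (p :: P).contains c)
        = s.count p + s.countP (fun c => P.contains c) := by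
      have := countP_or_split p (fun c => P.contains c) s hq
      simpa [List.contains_cons] using this
    rw [List.map_cons, List.sum_cons, ih hnd, hsplit]

theorem punct_strs_counts (s : String) :
    (punctStrs.map (fun p => PySem.Str.count s p)).sum
      = (punctChars.map (fun p => s.toList.count p)).sum := by
  simp [punctStrs, punctChars, PySem.Str.count_eq]
  norm_num [show ("," : String).toList = [','] from rfl,
    show (";" : String).toList = [';'] from rfl,
    show (":" : String).toList = [':'] from rfl,
    show ("|" : String).toList = ['|'] from rfl,
    show ("/" : String).toList = ['/'] from rfl,
    show ("\\" : String).toList = ['\\'] from rfl,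
    show ("=" : String).toList = ['='] from rfl,
    show ("(" : String).toList = ['('] from rfl,
    show (")" : String).toList = [')'] from rfl,
    show ("[" : String).toList = ['['] from rfl,
    show ("]" : String).toList = [']'] from rfl,
    show ("{" : String).toList = ['{'] from rfl,
    show ("}" : String).toList = ['}'] from rfl,
    count_single]

-- ===== VERDICT (by name: the statement is the Claim_ definition above) =====
theorem looks_noisy_value_spec : Claim_equal_looks_noisy_value := by
  intro v _
  unfold Spec_looks_noisy_value looks_noisy_value looks_noisy_value_alt
  by_cases h1 : v.toList.isEmpty
  · rw [if_pos h1, if_pos h1]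
  · rw [if_neg h1, if_neg h1]
    by_cases h2 : PySem.Str.len v > 80
    · rw [if_pos h2, if_pos h2]
    · rw [if_neg h2, if_neg h2]
      have hps : punctSet = punctChars := by decide
      have hsum : (punctStrs.map (fun p => PySem.Str.count v p)).sum
          = v.toList.countP (fun c => decide (c ∈ punctChars)) := by
        rw [punct_strs_counts, sum_counts_eq_countP punctChars (by decide)]
        simp
      have hn : v.toList.foldl (fun n c => if punctSet.contains c then n + 1 else n) 0
          = ((v.toList.countP (fun c => decide (c ∈ punctChars)) : Nat) : Int) := by
        rw [PySem.List.foldl_count_if, hps]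
        have hcg : List.countP (PySem.Set.contains punctChars) v.toList
            = List.countP (fun c => decide (c ∈ punctChars)) v.toList :=
          List.countP_congr (fun a _ => by simp [PySem.Set.contains])
        rw [hcg]
        omega
      rw [hsum, hn]
      by_cases h3 : 10 ≤ v.toList.countP (fun c => decide (c ∈ punctChars))
      · rw [if_pos h3]
        symm
        rw [decide_eq_true_iff]
        exact_mod_cast h3
      · rw [if_neg h3]
        symm
        rw [decide_eq_false_iff_not]
        intro hc
        exact h3 (by exact_mod_cast hc)
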